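-- pv_equiv track=rewrite | github.com/scatterp2/test | datachannel.py | try_reconstruct
-- ===== SOURCE A (Python) =====
-- def make_crc(data_str):
--     """Robust checksum using polynomial rolling hash with large prime modulo."""
--     # Use a polynomial rolling hash for better distribution than simple sum
--     prime = 1000000007  # Large prime for modulo
--     base = 31  # Prime base for polynomial
--
--     h = 0
--     for ch in data_str:
--         h = (h * base + int(ch)) % prime
--
--     # Return as 9-digit checksum to minimize collisions
--     return f"{h:09d}"
--
-- def try_reconstruct(phase_final_s, final_residual, offset_range=100000):
--     """Try to reconstruct target by testing sign combinations of phase S values.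
--
--     The target equals: sum(sign_i * S_i) + final_residual
--     We test all sign combinations and small offsets to find a CRC-valid match.
--     """
--     n = len(phase_final_s)
--     for offset in range(offset_range + 1):
--         for mask in range(1 << n):
--             total = 0
--             for i, s in enumerate(phase_final_s):
--                 if i == 0 or not (mask >> i & 1):
--                     total += s
--                 else:
--                     total -= s
--             # Add the final residual - this is critical!
--             total += final_residual
--             for candidate in ([total] if offset == 0 else [total + offset, total - offset]):
--                 if candidate <= 0:
--                     continue
--                 cs = str(candidate)
--                 # Polynomial hash produces 9 digits, so data is all but last 9 chars
--                 if len(cs) < 10: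
--                     continue
--                 data, crc = cs[:-9], cs[-9:]
--                 if make_crc(data) == crc:
--                     return candidate, offset
--     return None, None
-- ===== SOURCE B (Python) =====
-- def make_crc(data_str):
--     """Robust checksum using polynomial rolling hash with large prime modulo."""
--     prime = 1000000007
--     base = 31
--     h = 0
--     for ch in data_str:
--         h = (h * base + int(ch)) % prime
--     return f"{h:09d}"
--
-- def _crc_valid(candidate):
--     if candidate <= 0:
--         return False
--     cs = str(candidate)
--     if len(cs) < 10:
--         return False
--     return make_crc(cs[:-9]) == cs[-9:]
--
-- def try_reconstruct(phase_final_s, final_residual, offset_range=100000):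
--     """Same search, but the signed totals are built once by doubling (element 0 is
--     always added, so only 2^(n-1) distinct totals), then each offset only scans them."""
--     totals = [final_residual]
--     for i, s in enumerate(phase_final_s):
--         if i == 0:
--             totals = [t + s for t in totals]
--         else:
--             totals = [t + s for t in totals] + [t - s for t in totals]
--     for offset in range(offset_range + 1):
--         for total in totals:
--             for candidate in ([total] if offset == 0 else [total + offset, total - offset]):
--                 if _crc_valid(candidate):
--                     return candidate, offset
--     return None, None
-- ===== Notes on version B (the rewrite author's own statement) =====
-- stated objective: faster
-- what changed: B precomputes the signed totals once by doubling a list over the elements (element 0 always added, so only 2^(n-1) distinct totals) instead of recomputing every signed sum from its bit mask inside the offset loop.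
import Mathlib
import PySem

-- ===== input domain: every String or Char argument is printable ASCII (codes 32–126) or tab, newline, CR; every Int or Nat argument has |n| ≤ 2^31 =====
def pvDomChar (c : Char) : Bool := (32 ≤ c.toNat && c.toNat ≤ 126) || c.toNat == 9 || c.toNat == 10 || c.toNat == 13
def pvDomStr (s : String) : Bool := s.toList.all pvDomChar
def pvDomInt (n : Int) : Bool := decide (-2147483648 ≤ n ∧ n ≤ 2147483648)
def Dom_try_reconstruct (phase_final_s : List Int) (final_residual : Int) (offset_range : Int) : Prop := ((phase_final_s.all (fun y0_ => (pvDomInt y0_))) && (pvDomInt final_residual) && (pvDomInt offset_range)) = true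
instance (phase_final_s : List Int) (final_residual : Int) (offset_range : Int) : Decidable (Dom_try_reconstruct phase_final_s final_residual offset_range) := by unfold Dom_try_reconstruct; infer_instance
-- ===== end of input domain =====

-- B precomputes the 2^(n-1) distinct signed totals once by doubling, so each offset only scans them
-- instead of re-deriving every signed sum from its mask: an asymptotically smaller search with the same result.


-- ===== PORT A =====
-- make_crc: polynomial hash over the digit characters, then f"{h:09d}".
-- int(ch) is ported as ofStr? with default 0: every call site passes digit characters
-- (data comes from str(candidate) with candidate > 0), so the default is never used.
-- f"{h:09d}" is ported by hand (zero-pad to width 9): exact since h = _ % 1000000007 is nonnegative.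
def make_crc (data_str : List Char) : List Char :=
  let h := data_str.foldl
    (fun h ch => PySem.Int.mod (h * 31 + (PySem.Int.ofStr? (String.ofList [ch])).getD 0) 1000000007) 0
  let d := PySem.Int.toChars h
  List.replicate (9 - d.length) '0' ++ d

-- mask >> i & 1 is ported with Lean's '>>>' on Int (Python-exact per PySem) and PySem.Int.band;
-- the enumerate index is nonnegative, so .toNat is exact. cs[:-9]/cs[-9:] are take/drop at
-- length - 9, exact because that branch has cs.length ≥ 10.
def try_reconstruct (phase_final_s : List Int) (final_residual : Int) (offset_range : Int) : Option Int × Option Int :=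
  let n := phase_final_s.length
  match (PySem.List.pyRange 0 (offset_range + 1) 1).findSome? (fun offset =>
    (PySem.List.pyRange 0 ((1 : Int) <<< n) 1).findSome? (fun mask =>
      let total := (PySem.List.enumerate phase_final_s).foldl
        (fun total is =>
          if is.1 = 0 ∨ ¬ (PySem.Int.band (mask >>> is.1.toNat) 1 = 1) then total + is.2
          else total - is.2) 0
      let total := total + final_residual
      (if offset = 0 then [total] else [total + offset, total - offset]).findSome? (fun candidate =>
        if candidate ≤ 0 then none
        else
          let cs := PySem.Int.toChars candidate
          if cs.length < 10 then none
          else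
            let data := cs.take (cs.length - 9)
            let crc := cs.drop (cs.length - 9)
            if make_crc data = crc then some (candidate, offset) else none)))
  with
  | some co => (some co.1, some co.2)
  | none => (none, none)

-- ===== PORT B =====
def pvCrcValid (candidate : Int) : Bool :=
  if candidate ≤ 0 then false
  else
    let cs := PySem.Int.toChars candidate
    if cs.length < 10 then false
    else make_crc (cs.take (cs.length - 9)) == cs.drop (cs.length - 9)

def try_reconstruct_alt (phase_final_s : List Int) (final_residual : Int) (offset_range : Int) : Option Int × Option Int :=
  let totals := (PySem.List.enumerate phase_final_s).foldl
    (fun ts is =>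
      if is.1 = 0 then ts.map (· + is.2)
      else ts.map (· + is.2) ++ ts.map (· - is.2)) [final_residual]
  match (PySem.List.pyRange 0 (offset_range + 1) 1).findSome? (fun offset =>
    totals.findSome? (fun total =>
      (if offset = 0 then [total] else [total + offset, total - offset]).findSome? (fun candidate =>
        if pvCrcValid candidate then some (candidate, offset) else none)))
  with
  | some co => (some co.1, some co.2)
  | none => (none, none)

-- ===== PRECONDITION & SPEC =====
def Spec_try_reconstruct (phase_final_s : List Int) (final_residual : Int) (offset_range : Int) (out : Option Int × Option Int) : Prop := out = try_reconstruct_alt phase_final_s final_residual offset_range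
instance (phase_final_s : List Int) (final_residual : Int) (offset_range : Int) (out : Option Int × Option Int) : Decidable (Spec_try_reconstruct phase_final_s final_residual offset_range out) := by unfold Spec_try_reconstruct; infer_instance

-- ===== CLAIM (what is proved, stated in full; the proofs are below) =====
def Claim_equal_try_reconstruct : Prop := ∀ (phase_final_s : List Int) (final_residual : Int) (offset_range : Int), Dom_try_reconstruct phase_final_s final_residual offset_range → Spec_try_reconstruct phase_final_s final_residual offset_range (try_reconstruct phase_final_s final_residual offset_range)

-- ===== LEMMAS AND PROOFS =====

-- A's per-candidate body equals B's pvCrcValid-based body.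
theorem pv_check_eq (offset candidate : Int) :
    (if candidate ≤ 0 then none
     else
       let cs := PySem.Int.toChars candidate
       if cs.length < 10 then none
       else
         let data := cs.take (cs.length - 9)
         let crc := cs.drop (cs.length - 9)
         if make_crc data = crc then some (candidate, offset) else none)
    = (if pvCrcValid candidate then some (candidate, offset) else none) := by
  unfold pvCrcValid
  split_ifs with h1 h2 h3 <;> simp_all

-- Mask-indexed signed accumulation (Nat mask, explicit index), the meaning of A's inner fold
-- for indices ≥ 1.
def pvWfold (m : Nat) : Nat → Int → List Int → Int
  | _, t, [] => t
  | i, t, s :: ss => pvWfold m (i + 1) (if (m >>> i) &&& 1 = 1 then t - s else t + s) ss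

-- B's doubling step for indices ≥ 1 (index-independent).
def pvTotsFrom (t : Int) (xs : List Int) : List Int :=
  xs.foldl (fun ts s => ts.map (· + s) ++ ts.map (· - s)) [t]

theorem pvWfold_append (m : Nat) (xs : List Int) : ∀ (i : Nat) (t : Int) (s : Int),
    pvWfold m i t (xs ++ [s])
      = (if (m >>> (i + xs.length)) &&& 1 = 1 then pvWfold m i t xs - s else pvWfold m i t xs + s) := by
  induction xs with
  | nil => intro i t s; simp [pvWfold]
  | cons x xs ih =>
    intro i t s
    simp only [List.cons_append, pvWfold, ih]
    have : i + (x :: xs).length = (i + 1) + xs.length := by simp; omega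
    rw [this]

theorem pv_findSome?_congr {α β : Type} (l : List α) (f g : α → Option β)
    (h : ∀ x ∈ l, f x = g x) : l.findSome? f = l.findSome? g := by
  induction l with
  | nil => rfl
  | cons a l ih =>
    rw [List.findSome?_cons, List.findSome?_cons, h a (List.mem_cons_self)]
    cases g a with
    | some v => rfl
    | none => exact ih (fun x hx => h x (List.mem_cons_of_mem _ hx))

theorem pv_bit_stable (k i m : Nat) (hik : i < k) :
    ((2 ^ k + m) >>> i) &&& 1 = (m >>> i) &&& 1 := by
  rw [Nat.shiftRight_eq_div_pow, Nat.shiftRight_eq_div_pow]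
  have hd : (2 ^ k + m) / 2 ^ i = 2 ^ (k - i) + m / 2 ^ i := by
    rw [show 2 ^ k = 2 ^ (k - i) * 2 ^ i by rw [← pow_add]; congr 1; omega,
      Nat.add_comm, Nat.add_mul_div_right _ _ (Nat.pow_pos two_pos), Nat.add_comm]
  rw [hd, Nat.and_one_is_mod, Nat.and_one_is_mod,
    show 2 ^ (k - i) = 2 * 2 ^ (k - i - 1) by rw [← pow_succ']; congr 1; omega,
    Nat.add_comm, Nat.add_mul_mod_self_left]

theorem pvWfold_high (k m : Nat) (xs : List Int) : ∀ (i : Nat) (t : Int),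
    i + xs.length ≤ k → pvWfold (2 ^ k + m) i t xs = pvWfold m i t xs := by
  induction xs with
  | nil => intro i t _; simp [pvWfold]
  | cons x xs ih =>
    intro i t h
    simp only [List.length_cons] at h
    simp only [pvWfold, pv_bit_stable k i m (by omega), ih (i + 1) _ (by omega)]

-- Core: scanning all 2^(len+1) masks through g equals scanning the doubled totals list.
theorem pv_key {β : Type} (xs : List Int) : ∀ (t : Int) (g : Int → Option β),
    (List.range (2 ^ (xs.length + 1))).findSome? (fun m => g (pvWfold m 1 t xs))
      = (pvTotsFrom t xs).findSome? g := by
  induction xs using List.reverseRecOn with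
  | nil =>
    intro t g
    show (List.range 2).findSome? _ = _
    simp only [List.range_succ, List.range_zero, List.nil_append, pvWfold, pvTotsFrom,
      List.foldl_nil]
    cases hg : g t <;> simp [List.findSome?, hg]
  | append_singleton ys s ih =>
    intro t g
    have hlen : (ys ++ [s]).length + 1 = (ys.length + 1) + 1 := by simp
    rw [hlen, pow_succ]
    have hsplit : List.range (2 ^ (ys.length + 1) * 2)
        = List.range (2 ^ (ys.length + 1))
          ++ (List.range (2 ^ (ys.length + 1))).map (fun x => 2 ^ (ys.length + 1) + x) := by
      rw [show 2 ^ (ys.length + 1) * 2 = 2 ^ (ys.length + 1) + 2 ^ (ys.length + 1) by ring,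
        List.range_add]
    rw [hsplit, List.findSome?_append, List.findSome?_map]
    have hlow : ∀ m ∈ List.range (2 ^ (ys.length + 1)),
        (fun m => g (pvWfold m 1 t (ys ++ [s]))) m = (fun v => g (v + s)) (pvWfold m 1 t ys) := by
      intro m hm
      rw [List.mem_range] at hm
      have hb : (m >>> (1 + ys.length)) &&& 1 = 0 := by
        rw [Nat.shiftRight_eq_div_pow, Nat.div_eq_of_lt (by rw [Nat.add_comm]; exact hm)]
        rfl
      show g (pvWfold m 1 t (ys ++ [s])) = _
      rw [pvWfold_append, hb, if_neg (by simp)]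
    have hhigh : ∀ m ∈ List.range (2 ^ (ys.length + 1)),
        ((fun m => g (pvWfold m 1 t (ys ++ [s]))) ∘ (fun x => 2 ^ (ys.length + 1) + x)) m
          = (fun v => g (v - s)) (pvWfold m 1 t ys) := by
      intro m hm
      rw [List.mem_range] at hm
      have hb : ((2 ^ (ys.length + 1) + m) >>> (1 + ys.length)) &&& 1 = 1 := by
        rw [Nat.shiftRight_eq_div_pow, Nat.add_comm 1 ys.length,
          Nat.add_comm (2 ^ (ys.length + 1)) m,
          Nat.add_div_right _ (Nat.pow_pos two_pos), Nat.div_eq_of_lt hm]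
        rfl
      show g (pvWfold (2 ^ (ys.length + 1) + m) 1 t (ys ++ [s])) = _
      rw [pvWfold_append, hb, if_pos rfl, pvWfold_high _ _ _ _ _ (by omega)]
    rw [pv_findSome?_congr _ _ _ hlow, pv_findSome?_congr _ _ _ hhigh,
      ih t (fun v => g (v + s)), ih t (fun v => g (v - s))]
    have htots : pvTotsFrom t (ys ++ [s])
        = (pvTotsFrom t ys).map (· + s) ++ (pvTotsFrom t ys).map (· - s) := by
      simp [pvTotsFrom, List.foldl_append]
    rw [htots, List.findSome?_append, List.findSome?_map, List.findSome?_map]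
    rfl

-- Bridge: A's fold over enumerate with mask = ↑m and start index ≥ 1 is pvWfold.
theorem pv_afold_eq (xs : List Int) : ∀ (i : Nat) (t : Int) (m : Nat) (mask : Int), mask = (m : Int) → 1 ≤ i →
    (PySem.List.enumerate xs (i : Int)).foldl
      (fun total is =>
        if is.1 = 0 ∨ ¬ (PySem.Int.band
            (@HShiftRight.hShiftRight Int Nat Int Int.instHShiftRightNat mask is.1.toNat) 1 = 1)
        then total + is.2 else total - is.2) t
      = pvWfold m i t xs := by
  induction xs with
  | nil => intro i t m mask _ _; simp [PySem.List.enumerate_nil, pvWfold]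
  | cons x xs ih =>
    intro i t m mask hmask hi
    subst hmask
    rw [PySem.List.enumerate_cons, List.foldl_cons]
    have h0 : ¬ ((i : Int) = 0) := by omega
    have hcast : ((i : Int) + 1) = ((i + 1 : Nat) : Int) := by push_cast; ring
    have hband : ∀ k : Nat, PySem.Int.band (((m >>> k : Nat) : Int)) 1
        = (((m >>> k) &&& 1 : Nat) : Int) := fun k => by
      exact_mod_cast PySem.Int.band_natCast (m >>> k) 1
    rw [show ((i : Int)).toNat = i from Int.toNat_natCast i,
      ← Int.natCast_shiftRight m i, hband i, hcast]
    rcases eq_or_ne ((m >>> i) &&& 1) 1 with hb | hb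
    · rw [if_neg (not_or.mpr ⟨h0, not_not.mpr (by exact_mod_cast hb)⟩), pvWfold, if_pos hb]
      exact ih (i + 1) _ m _ rfl (by omega)
    · rw [if_pos (Or.inr (by exact_mod_cast hb)), pvWfold, if_neg hb]
      exact ih (i + 1) _ m _ rfl (by omega)

-- Bridge: B's fold over enumerate with start index ≥ 1 ignores the index.
theorem pv_bfold_eq (xs : List Int) : ∀ (i : Nat) (ts : List Int), 1 ≤ i →
    (PySem.List.enumerate xs (i : Int)).foldl
      (fun ts is => if is.1 = 0 then ts.map (· + is.2) else ts.map (· + is.2) ++ ts.map (· - is.2)) ts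
      = xs.foldl (fun ts s => ts.map (· + s) ++ ts.map (· - s)) ts := by
  induction xs with
  | nil => intro i ts _; simp [PySem.List.enumerate_nil]
  | cons x xs ih =>
    intro i ts hi
    rw [PySem.List.enumerate_cons, List.foldl_cons, List.foldl_cons]
    have h0 : ¬ ((i : Int) = 0) := by omega
    rw [if_neg h0, show ((i : Int) + 1) = ((i + 1 : Nat) : Int) by push_cast; ring]
    exact ih (i + 1) _ (by omega)

-- Per-offset equality of the two inner searches.
theorem pv_inner_eq (ps : List Int) (fr offset : Int) :
    (PySem.List.pyRange 0 ((1 : Int) <<< ps.length) 1).findSome? (fun mask =>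
      let total := (PySem.List.enumerate ps).foldl
        (fun total is =>
          if is.1 = 0 ∨ ¬ (PySem.Int.band (mask >>> is.1.toNat) 1 = 1) then total + is.2
          else total - is.2) 0
      let total := total + fr
      (if offset = 0 then [total] else [total + offset, total - offset]).findSome? (fun candidate =>
        if candidate ≤ 0 then none
        else
          let cs := PySem.Int.toChars candidate
          if cs.length < 10 then none
          else
            let data := cs.take (cs.length - 9)
            let crc := cs.drop (cs.length - 9)
            if make_crc data = crc then some (candidate, offset) else none))
    = ((PySem.List.enumerate ps).foldl
        (fun ts is =>
          if is.1 = 0 then ts.map (· + is.2) else ts.map (· + is.2) ++ ts.map (· - is.2))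
        [fr]).findSome? (fun total =>
        (if offset = 0 then [total] else [total + offset, total - offset]).findSome? (fun candidate =>
          if pvCrcValid candidate then some (candidate, offset) else none)) := by
  -- replace the candidate bodies by the shared form
  simp only [pv_check_eq offset]
  set g : Int → Option (Int × Int) := fun total =>
    (if offset = 0 then [total] else [total + offset, total - offset]).findSome? (fun candidate =>
      if pvCrcValid candidate then some (candidate, offset) else none) with hg
  -- the mask range as a Nat range
  have hshift : (1 : Int) <<< ps.length = ((2 ^ ps.length : Nat) : Int) := by
    rw [Int.shiftLeft_eq]; push_cast; ring
  have hrange : PySem.List.pyRange 0 ((1 : Int) <<< ps.length) 1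
      = (List.range (2 ^ ps.length)).map (fun k : Nat => (k : Int)) := by
    rw [hshift, PySem.List.pyRange_one, sub_zero, Int.toNat_natCast]
    simp
  rw [hrange, List.findSome?_map]
  cases ps with
  | nil =>
    simp [PySem.List.enumerate_nil]
    rw [hg]
  | cons s0 rest =>
    have hA : ∀ (m : Nat) (mask : Int), mask = (m : Int) →
        (PySem.List.enumerate (s0 :: rest)).foldl
          (fun total is =>
            if is.1 = 0 ∨ ¬ (PySem.Int.band
                (@HShiftRight.hShiftRight Int Nat Int Int.instHShiftRightNat mask is.1.toNat) 1 = 1)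
            then total + is.2 else total - is.2) 0
          = pvWfold m 1 s0 rest := by
      intro m mask hmask
      rw [PySem.List.enumerate_cons, List.foldl_cons]
      rw [if_pos (Or.inl rfl)]
      rw [show ((0 : Int) + 1) = ((1 : Nat) : Int) from rfl]
      exact pv_afold_eq rest 1 (0 + s0) m mask hmask le_rfl |>.trans (by rw [zero_add])
    have hB : (PySem.List.enumerate (s0 :: rest)).foldl
        (fun ts is =>
          if is.1 = 0 then ts.map (· + is.2) else ts.map (· + is.2) ++ ts.map (· - is.2))
        [fr] = pvTotsFrom (fr + s0) rest := by
      rw [PySem.List.enumerate_cons, List.foldl_cons, if_pos rfl,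
        show ((0 : Int) + 1) = ((1 : Nat) : Int) from rfl, pv_bfold_eq rest 1 _ le_rfl]
      rfl
    rw [hB, ← pv_key rest (fr + s0) g]
    apply pv_findSome?_congr
    intro m hm
    simp only [Function.comp_apply]
    rw [hA m (m : Int) rfl]
    have harith : ∀ (ys : List Int) (i : Nat) (t c : Int),
        pvWfold m i t ys + c = pvWfold m i (t + c) ys := by
      intro ys
      induction ys with
      | nil => intro i t c; rfl
      | cons y ys ih =>
        intro i t c
        simp only [pvWfold]
        rw [ih]
        split_ifs <;> congr 1 <;> ring
    show g (pvWfold m 1 s0 rest + fr) = g (pvWfold m 1 (fr + s0) rest)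
    rw [harith, add_comm fr s0]

-- ===== VERDICT (by name: the statement is the Claim_ definition above) =====
theorem try_reconstruct_spec : Claim_equal_try_reconstruct := by
  intro ps fr oR _
  show try_reconstruct ps fr oR = try_reconstruct_alt ps fr oR
  unfold try_reconstruct try_reconstruct_alt
  exact congrArg
    (fun r : Option (Int × Int) => match r with
      | some co => (some co.1, some co.2)
      | none => ((none : Option Int), (none : Option Int)))
    (pv_findSome?_congr _ _ _ (fun offset _ => pv_inner_eq ps fr offset))
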